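-- pv_equiv track=rewrite | github.com/danielzak555/magshimim_all_hw | Python/7 loops/7.2.7.py | arrow
-- ===== SOURCE A (Python) =====
-- def arrow(my_char, max_length):
--     """Return an arrow of a given length.
--     :param my_char: a character
--     :type my_char: char
--     :param max_length: the length of the arrow
--     :type max_length: int
--     :return: an arrow of a given length
--     :rtype: str
--     """
--     str = ""
--     for i in range(1, max_length + 1):
--         str += my_char * i
--         str += "\n"
--     for i in range(max_length - 1, 0, -1):
--         str += my_char * i
--         str += "\n"
--     str = str[:-1]
--     return str
-- ===== SOURCE B (Python) =====
-- def arrow(my_char, max_length):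
--     n = max_length
--     rows = [my_char * (n - abs(i - (n - 1))) for i in range(2 * n - 1)]
--     return "\n".join(rows)
-- ===== Notes on version B (the rewrite author's own statement) =====
-- stated objective: idiomatic
-- what changed: Replaces A's two separate ascending/descending accumulation loops plus trailing-character trim with a single symmetric index loop (width = n - |i-(n-1)|) building a row list joined by '\n'.
import Mathlib
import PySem

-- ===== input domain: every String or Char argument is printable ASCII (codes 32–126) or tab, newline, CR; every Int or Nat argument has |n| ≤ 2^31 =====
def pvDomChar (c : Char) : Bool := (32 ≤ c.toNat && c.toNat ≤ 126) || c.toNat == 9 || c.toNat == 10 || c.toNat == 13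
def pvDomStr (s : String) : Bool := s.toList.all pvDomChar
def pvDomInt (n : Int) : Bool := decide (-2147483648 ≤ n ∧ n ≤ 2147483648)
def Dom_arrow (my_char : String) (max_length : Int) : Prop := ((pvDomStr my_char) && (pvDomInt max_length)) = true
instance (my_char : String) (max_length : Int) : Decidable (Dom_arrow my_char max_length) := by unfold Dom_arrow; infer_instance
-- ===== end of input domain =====

-- B replaces A's two accumulation loops and trailing trim with one symmetric index loop and a join (idiomatic decomposition, same cost).

-- ===== PORT A =====
-- A: ascending loop appending my_char*i and "\n", descending loop appending my_char*i and "\n", then str[:-1].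
def arrow (my_char : String) (max_length : Int) : String :=
  let s0 : List Char := []
  let s1 := (PySem.List.pyRange 1 (max_length + 1) 1).foldl
    (fun acc i => acc ++ PySem.List.pyRepeat my_char.toList i ++ ['\n']) s0
  let s2 := (PySem.List.pyRange (max_length - 1) 0 (-1)).foldl
    (fun acc i => acc ++ PySem.List.pyRepeat my_char.toList i ++ ['\n']) s1
  String.mk (PySem.List.slice s2 none (some (-1)))

-- ===== PORT B =====
-- B: one pass i = 0 .. 2n-2, row width n - |i - (n-1)|, rows joined with "\n".
def arrow_alt (my_char : String) (max_length : Int) : String :=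
  let n := max_length
  let rows := (PySem.List.pyRange 0 (2 * n - 1) 1).map
    (fun i => PySem.List.pyRepeat my_char.toList (n - |i - (n - 1)|))
  String.mk (PySem.Chars.join ['\n'] rows)

-- ===== PRECONDITION & SPEC =====
def Spec_arrow (my_char : String) (max_length : Int) (out : String) : Prop := out = arrow_alt my_char max_length
instance (my_char : String) (max_length : Int) (out : String) : Decidable (Spec_arrow my_char max_length out) := by unfold Spec_arrow; infer_instance

-- ===== CLAIM (what is proved, stated in full; the proofs are below) =====
def Claim_equal_arrow : Prop := ∀ (my_char : String) (max_length : Int), Dom_arrow my_char max_length → Spec_arrow my_char max_length (arrow my_char max_length)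

-- ===== LEMMAS AND PROOFS =====

-- join with a separator equals "append sep after every row, drop the last sep" on a nonempty row list
theorem join_eq_dropLast_flatMap (r : List Char) (rest : List (List Char)) :
    PySem.Chars.join ['\n'] (r :: rest) =
      ((r :: rest).flatMap (fun p => p ++ ['\n'])).dropLast := by
  induction rest generalizing r with
  | nil =>
    rw [PySem.Chars.join_singleton, List.flatMap_cons, List.flatMap_nil, List.append_nil,
        List.dropLast_append_of_ne_nil (by simp)]
    simp
  | cons q rest ih =>
    rw [PySem.Chars.join_cons_cons, ih q]
    have hne : (q :: rest).flatMap (fun p => p ++ ['\n']) ≠ [] := by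
      simp [List.flatMap_cons]
    rw [List.flatMap_cons (xs := q :: rest), List.dropLast_append_of_ne_nil hne,
        List.append_assoc]

-- the symmetric widths of B enumerate A's ascending then descending widths
theorem widths_eq (n : Int) (hn : 1 ≤ n) :
    (PySem.List.pyRange 0 (2 * n - 1) 1).map (fun i => n - |i - (n - 1)|) =
      PySem.List.pyRange 1 (n + 1) 1 ++ PySem.List.pyRange (n - 1) 0 (-1) := by
  rw [PySem.List.pyRange_one, PySem.List.pyRange_one, PySem.List.pyRange_neg_one]
  rw [List.map_map]
  apply List.ext_getElem
  · simp; omega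
  · intro j h1 h2
    simp only [List.getElem_map, List.getElem_range, Function.comp]
    simp only [List.length_map, List.length_range] at h1
    rcases Nat.lt_or_ge j (n.toNat) with hj | hj
    · rw [List.getElem_append_left (by simpa using hj)]
      simp only [List.getElem_map, List.getElem_range]
      rw [abs_of_nonpos (by omega)]
      omega
    · rw [List.getElem_append_right (by simpa using hj)]
      simp only [List.getElem_map, List.getElem_range, List.length_map, List.length_range]
      rw [abs_of_nonneg (by omega)]
      omega

-- ===== VERDICT (by name: the statement is the Claim_ definition above) =====
theorem arrow_spec : Claim_equal_arrow := by
  intro my_char n _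
  unfold Spec_arrow arrow arrow_alt
  simp only
  have hassoc : (fun (acc : List Char) (i : Int) =>
      acc ++ PySem.List.pyRepeat my_char.toList i ++ ['\n']) =
      (fun acc i => acc ++ (PySem.List.pyRepeat my_char.toList i ++ ['\n'])) := by
    funext a i; rw [List.append_assoc]
  by_cases hn : n ≤ 0
  · -- degenerate: both sides are the empty string
    rw [show PySem.List.pyRange 1 (n + 1) 1 = [] from PySem.List.pyRange_one_eq_nil (by omega),
        show PySem.List.pyRange (n - 1) 0 (-1) = [] from PySem.List.pyRange_neg_one_eq_nil (by omega),
        show PySem.List.pyRange 0 (2 * n - 1) 1 = [] from PySem.List.pyRange_one_eq_nil (by omega)]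
    simp [PySem.Chars.join, PySem.List.slice, List.intercalate]
  · -- 1 ≤ n
    rw [not_le] at hn
    rw [hassoc, PySem.List.foldl_append_eq_flatMap, PySem.List.foldl_append_eq_flatMap,
        List.nil_append, ← List.flatMap_append]
    rw [PySem.List.slice_to_neg_one]
    have hmap : (PySem.List.pyRange 0 (2 * n - 1) 1).map
        (fun i => PySem.List.pyRepeat my_char.toList (n - |i - (n - 1)|)) =
        ((PySem.List.pyRange 1 (n + 1) 1 ++ PySem.List.pyRange (n - 1) 0 (-1)).map
          (fun i => PySem.List.pyRepeat my_char.toList i)) := by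
      rw [← widths_eq n (by omega), List.map_map]; rfl
    rw [hmap]
    have hcons : PySem.List.pyRange 1 (n + 1) 1 = 1 :: PySem.List.pyRange 2 (n + 1) 1 :=
      PySem.List.pyRange_one_cons (by omega)
    rw [hcons, List.cons_append, List.map_cons, join_eq_dropLast_flatMap _ _,
        ← List.map_cons, ← List.cons_append, List.flatMap_map]
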